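-- pv_equiv track=rewrite | github.com/MrBrantCode/unitest_baseline | mut_generate/mist_train_taco/taco_19157/solution.py | min_deletions_to_make_pure
-- ===== SOURCE A (Python) =====
-- def min_deletions_to_make_pure(S: str) -> int:
--     dp = [0 if i < 2 else len(S) for i in range(6)]
--
--     for c in S:
--         if c == '1':
--             dp[3] = min(dp[3], dp[0])
--             dp[0] += 1
--             dp[5] = min(dp[5], dp[2])
--             dp[2] += 1
--             dp[4] += 1
--         else:
--             dp[2] = min(dp[2], dp[1])
--             dp[1] += 1
--             dp[4] = min(dp[4], dp[3])
--             dp[3] += 1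
--             dp[5] += 1
--
--     return min(dp)
-- ===== SOURCE B (Python) =====
-- def min_deletions_to_make_pure(S: str) -> int:
--     # Prefix-sum formulation: the answer is the fewest deletions making S match
--     # 1*0*1* or 0*1*0* (any non-'1' char counts as '0'); enumerate the two block
--     # boundaries i <= j and price each split with prefix counts of ones.
--     n = len(S)
--     ones = [0]
--     cnt = 0
--     for c in S:
--         if c == '1':
--             cnt += 1
--         ones.append(cnt)
--     best = n
--     for i in range(n + 1):
--         for j in range(i, n + 1):
--             def_zeros_i = i - ones[i]
--             zeros_j = j - ones[j]
--             zeros_n = n - ones[n]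
--             cost101 = def_zeros_i + (ones[j] - ones[i]) + (zeros_n - zeros_j)
--             cost010 = ones[i] + (zeros_j - def_zeros_i) + (ones[n] - ones[j])
--             best = min(best, cost101, cost010)
--     return best
-- ===== Notes on version B (the rewrite author's own statement) =====
-- stated objective: alternative
-- what changed: A's six-state streaming DP (one automaton state per run-pattern prefix, updated per character) is replaced by a prefix-sum formulation: B precomputes counts of ones, then explicitly enumerates the two block boundaries i <= j of the target patterns 1*0*1* and 0*1*0* and takes the minimum split cost.
import Mathlib
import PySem

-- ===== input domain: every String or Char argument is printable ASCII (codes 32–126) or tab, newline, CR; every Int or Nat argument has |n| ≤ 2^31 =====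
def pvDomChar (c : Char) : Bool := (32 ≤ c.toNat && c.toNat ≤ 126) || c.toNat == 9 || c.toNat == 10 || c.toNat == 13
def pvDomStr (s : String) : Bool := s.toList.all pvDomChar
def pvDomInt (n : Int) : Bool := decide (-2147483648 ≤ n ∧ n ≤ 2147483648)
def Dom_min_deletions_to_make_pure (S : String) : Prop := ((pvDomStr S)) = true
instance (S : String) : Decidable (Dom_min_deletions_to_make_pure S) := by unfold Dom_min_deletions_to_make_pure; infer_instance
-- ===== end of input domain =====

-- B replaces A's six-state streaming DP with prefix counts of ones plus an explicit
-- enumeration of the two block boundaries of the patterns 1*0*1* / 0*1*0* (objective: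
-- alternative formulation; B is O(n^2) vs A's O(n)).

-- ===== PORT A =====
-- one step of A's loop body, in statement order; dp is the 6-tuple (dp[0],…,dp[5])
def aStep (d : Int × Int × Int × Int × Int × Int) (c : Char) : Int × Int × Int × Int × Int × Int :=
  match d with
  | (d0, d1, d2, d3, d4, d5) =>
    if c = '1' then
      let d3' := min d3 d0
      let d0' := d0 + 1
      let d5' := min d5 d2
      let d2' := d2 + 1
      let d4' := d4 + 1
      (d0', d1, d2', d3', d4', d5')
    else
      let d2' := min d2 d1
      let d1' := d1 + 1
      let d4' := min d4 d3
      let d3' := d3 + 1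
      let d5' := d5 + 1
      (d0, d1', d2', d3', d4', d5')

def min_deletions_to_make_pure (S : String) : Int :=
  -- dp = [0 if i < 2 else len(S) for i in range(6)]; n is len(S)
  match S.toList.foldl aStep (0, 0, (S.toList.length : Int), (S.toList.length : Int),
      (S.toList.length : Int), (S.toList.length : Int)) with
  | (d0, d1, d2, d3, d4, d5) => min (min (min (min (min d0 d1) d2) d3) d4) d5   -- min(dp)

-- ===== PORT B =====
-- ones = [0]; cnt = 0; for c in S: cnt += (c == '1'); ones.append(cnt)
def buildOnes (l : List Char) : List Int × Int :=
  l.foldl (fun (st : List Int × Int) c =>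
    let cnt := if c = '1' then st.2 + 1 else st.2
    (st.1 ++ [cnt], cnt)) ([0], 0)

-- body of the inner j-loop: best = min(best, cost101, cost010)
def bInner (ones : List Int) (n : Nat) (i : Int) (b j : Int) : Int :=
  -- ones[i], ones[j], ones[n]: 0 ≤ i ≤ j ≤ n, so the indices are always in range
  let oi := ones.getD i.toNat 0
  let oj := ones.getD j.toNat 0
  let onn := ones.getD n 0
  let zi := i - oi
  let zj := j - oj
  let zn := (n : Int) - onn
  let c101 := zi + (oj - oi) + (zn - zj)
  let c010 := oi + (zj - zi) + (onn - oj)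
  min (min b c101) c010

-- the inner loop: for j in range(i, n+1)
def bOuter (ones : List Int) (n : Nat) (best i : Int) : Int :=
  (PySem.List.pyRange i ((n : Int) + 1) 1).foldl (bInner ones n i) best

def min_deletions_to_make_pure_alt (S : String) : Int :=
  let l := S.toList
  let n := l.length
  let ones := (buildOnes l).1
  -- best = n; for i in range(n+1): for j in range(i, n+1): best = min(best, cost101, cost010)
  (PySem.List.pyRange 0 ((n : Int) + 1) 1).foldl (bOuter ones n) (n : Int)

-- ===== PRECONDITION & SPEC =====
def Spec_min_deletions_to_make_pure (S : String) (out : Int) : Prop := out = min_deletions_to_make_pure_alt S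
instance (S : String) (out : Int) : Decidable (Spec_min_deletions_to_make_pure S out) := by unfold Spec_min_deletions_to_make_pure; infer_instance

-- ===== CLAIM (what is proved, stated in full; the proofs are below) =====
def Claim_equal_min_deletions_to_make_pure : Prop := ∀ (S : String), Dom_min_deletions_to_make_pure S → Spec_min_deletions_to_make_pure S (min_deletions_to_make_pure S)

-- ===== LEMMAS AND PROOFS =====

-- number of '1' characters, and of non-'1' characters, as Ints
def oC : List Char → Int
  | [] => 0
  | c :: t => (if c = '1' then 1 else 0) + oC t

def zC : List Char → Int
  | [] => 0
  | c :: t => (if c = '1' then 0 else 1) + zC t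

lemma oC_append (p q : List Char) : oC (p ++ q) = oC p + oC q := by
  induction p with
  | nil => simp [oC]
  | cons c t ih => simp [oC, ih]; ring

lemma zC_append (p q : List Char) : zC (p ++ q) = zC p + zC q := by
  induction p with
  | nil => simp [zC]
  | cons c t ih => simp [zC, ih]; ring

lemma oC_nonneg (p : List Char) : 0 ≤ oC p := by
  induction p with
  | nil => simp [oC]
  | cons c t ih => simp only [oC]; split <;> omega

lemma zC_nonneg (p : List Char) : 0 ≤ zC p := by
  induction p with
  | nil => simp [zC]
  | cons c t ih => simp only [zC]; split <;> omega

lemma oC_add_zC (p : List Char) : oC p + zC p = (p.length : Int) := by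
  induction p with
  | nil => simp [oC, zC]
  | cons c t ih => simp only [oC, zC, List.length_cons]; split <;> push_cast <;> omega

-- cost of matching the prefix-relative pattern 1*0*1* with boundaries i ≤ j ≤ |p|
def pc1 (p : List Char) (i j : Nat) : Int :=
  zC (p.take i) + (oC (p.take j) - oC (p.take i)) + (zC p - zC (p.take j))

-- cost of matching 0*1*0* with boundaries i ≤ j ≤ |p|
def pc2 (p : List Char) (i j : Nat) : Int :=
  oC (p.take i) + (zC (p.take j) - zC (p.take i)) + (oC p - oC (p.take j))

-- 1*0* (no third block yet): pc1 with j = |p|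
def g2 (p : List Char) (i : Nat) : Int := zC (p.take i) + (oC p - oC (p.take i))
-- 0*1*
def g3 (p : List Char) (i : Nat) : Int := oC (p.take i) + (zC p - zC (p.take i))

lemma oC_app1 (p : List Char) (c : Char) : oC (p ++ [c]) = oC p + (if c = '1' then 1 else 0) := by
  rw [oC_append]; simp [oC]

lemma zC_app1 (p : List Char) (c : Char) : zC (p ++ [c]) = zC p + (if c = '1' then 0 else 1) := by
  rw [zC_append]; simp [zC]

lemma take_app1 (p : List Char) (c : Char) {i : Nat} (hi : i ≤ p.length) :
    (p ++ [c]).take i = p.take i := List.take_append_of_le_length hi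

lemma take_app1_len (p : List Char) (c : Char) : (p ++ [c]).take p.length = p := by
  rw [take_app1 p c le_rfl, List.take_length]

lemma take_app1_top (p : List Char) (c : Char) : (p ++ [c]).take (p.length + 1) = p ++ [c] := by
  apply List.take_of_length_le; simp

lemma g2_app (p : List Char) (c : Char) {i : Nat} (hi : i ≤ p.length) :
    g2 (p ++ [c]) i = g2 p i + (if c = '1' then 1 else 0) := by
  simp only [g2, take_app1 p c hi, oC_app1]; split <;> ring

lemma g3_app (p : List Char) (c : Char) {i : Nat} (hi : i ≤ p.length) :
    g3 (p ++ [c]) i = g3 p i + (if c = '1' then 0 else 1) := by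
  simp only [g3, take_app1 p c hi, zC_app1]; split <;> ring

lemma g2_app_top (p : List Char) (c : Char) : g2 (p ++ [c]) (p.length + 1) = zC (p ++ [c]) := by
  simp only [g2, take_app1_top]; ring

lemma g3_app_top (p : List Char) (c : Char) : g3 (p ++ [c]) (p.length + 1) = oC (p ++ [c]) := by
  simp only [g3, take_app1_top]; ring

lemma g2_app_len (p : List Char) (c : Char) : g2 (p ++ [c]) p.length = zC p + (if c = '1' then 1 else 0) := by
  simp only [g2, take_app1_len, oC_app1]; split <;> ring

lemma g3_app_len (p : List Char) (c : Char) : g3 (p ++ [c]) p.length = oC p + (if c = '1' then 0 else 1) := by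
  simp only [g3, take_app1_len, zC_app1]; split <;> ring

lemma pc1_app (p : List Char) (c : Char) {i j : Nat} (hi : i ≤ p.length) (hj : j ≤ p.length) :
    pc1 (p ++ [c]) i j = pc1 p i j + (if c = '1' then 0 else 1) := by
  simp only [pc1, take_app1 p c hi, take_app1 p c hj, zC_app1]; split <;> ring

lemma pc2_app (p : List Char) (c : Char) {i j : Nat} (hi : i ≤ p.length) (hj : j ≤ p.length) :
    pc2 (p ++ [c]) i j = pc2 p i j + (if c = '1' then 1 else 0) := by
  simp only [pc2, take_app1 p c hi, take_app1 p c hj, oC_app1]; split <;> ring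

lemma pc1_app_top (p : List Char) (c : Char) {i : Nat} (hi : i ≤ p.length) :
    pc1 (p ++ [c]) i (p.length + 1) = g2 p i + (if c = '1' then 1 else 0) := by
  simp only [pc1, g2, take_app1 p c hi, take_app1_top, oC_app1]; split <;> ring

lemma pc2_app_top (p : List Char) (c : Char) {i : Nat} (hi : i ≤ p.length) :
    pc2 (p ++ [c]) i (p.length + 1) = g3 p i + (if c = '1' then 0 else 1) := by
  simp only [pc2, g3, take_app1 p c hi, take_app1_top, zC_app1]; split <;> ring

lemma pc1_app_len (p : List Char) (c : Char) {i : Nat} (hi : i ≤ p.length) :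
    pc1 (p ++ [c]) i p.length = g2 p i + (if c = '1' then 0 else 1) := by
  simp only [pc1, g2, take_app1 p c hi, take_app1_len, zC_app1]; split <;> ring

lemma pc2_app_len (p : List Char) (c : Char) {i : Nat} (hi : i ≤ p.length) :
    pc2 (p ++ [c]) i p.length = g3 p i + (if c = '1' then 1 else 0) := by
  simp only [pc2, g3, take_app1 p c hi, take_app1_len, oC_app1]; split <;> ring

lemma pc1_app_tt (p : List Char) (c : Char) :
    pc1 (p ++ [c]) (p.length + 1) (p.length + 1) = zC (p ++ [c]) := by
  simp only [pc1, take_app1_top]; ring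

lemma pc2_app_tt (p : List Char) (c : Char) :
    pc2 (p ++ [c]) (p.length + 1) (p.length + 1) = oC (p ++ [c]) := by
  simp only [pc2, take_app1_top]; ring

lemma oC_le_len (p : List Char) : oC p ≤ (p.length : Int) := by
  have := zC_nonneg p; have := oC_add_zC p; omega

lemma zC_le_len (p : List Char) : zC p ≤ (p.length : Int) := by
  have := oC_nonneg p; have := oC_add_zC p; omega

-- the full two-sided invariant of A's loop after processing prefix p of a string of length n
def AInv (n : Int) (p : List Char) (d0 d1 d2 d3 d4 d5 : Int) : Prop :=
  d0 = oC p ∧ d1 = zC p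
  ∧ (d2 ≥ n + oC p ∨ ∃ i ≤ p.length, d2 ≥ g2 p i)
  ∧ (d3 ≥ n + zC p ∨ ∃ i ≤ p.length, d3 ≥ g3 p i)
  ∧ (d4 ≥ n + oC p ∨ ∃ i j, i ≤ j ∧ j ≤ p.length ∧ d4 ≥ pc2 p i j)
  ∧ (d5 ≥ n + zC p ∨ ∃ i j, i ≤ j ∧ j ≤ p.length ∧ d5 ≥ pc1 p i j)
  ∧ (∀ i, i ≤ p.length → min d1 d2 ≤ g2 p i)
  ∧ (∀ i, i ≤ p.length → min d0 d3 ≤ g3 p i)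
  ∧ (∀ i j, i ≤ j → j ≤ p.length → min d0 (min d3 d4) ≤ pc2 p i j)
  ∧ (∀ i j, i ≤ j → j ≤ p.length → min d1 (min d2 d5) ≤ pc1 p i j)

lemma inv_init (n : Int) : AInv n [] 0 0 n n n n := by
  refine ⟨rfl, rfl, Or.inl (by simp [oC]), Or.inl (by simp [zC]), Or.inl (by simp [oC]),
    Or.inl (by simp [zC]), ?_, ?_, ?_, ?_⟩
  · intro i hi; have hi0 : i = 0 := by simpa using hi
    subst hi0; simp [g2, oC, zC]
  · intro i hi; have hi0 : i = 0 := by simpa using hi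
    subst hi0; simp [g3, oC, zC]
  · intro i j hij hj
    have hj0 : j = 0 := by simpa using hj
    have hi0 : i = 0 := by omega
    subst hj0; subst hi0; simp [pc2, oC, zC]
  · intro i j hij hj
    have hj0 : j = 0 := by simpa using hj
    have hi0 : i = 0 := by omega
    subst hj0; subst hi0; simp [pc1, oC, zC]

lemma inv_step (n : Int) (p : List Char) (c : Char) (d0 d1 d2 d3 d4 d5 : Int)
    (h : AInv n p d0 d1 d2 d3 d4 d5) (hlen : (p.length : Int) < n) :
    AInv n (p ++ [c]) (aStep (d0, d1, d2, d3, d4, d5) c).1 (aStep (d0, d1, d2, d3, d4, d5) c).2.1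
      (aStep (d0, d1, d2, d3, d4, d5) c).2.2.1 (aStep (d0, d1, d2, d3, d4, d5) c).2.2.2.1
      (aStep (d0, d1, d2, d3, d4, d5) c).2.2.2.2.1 (aStep (d0, d1, d2, d3, d4, d5) c).2.2.2.2.2 := by
  obtain ⟨e0, e1, i2, i3, i4, i5, l2, l3, l4, l5⟩ := h
  have hoz := oC_add_zC p
  have honn := oC_nonneg p
  have hznn := zC_nonneg p
  by_cases hc : c = '1'
  · subst hc
    simp only [aStep]
    refine ⟨?_, ?_, ?_, ?_, ?_, ?_, ?_, ?_, ?_, ?_⟩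
    · simp [oC_app1]; omega
    · simp [zC_app1]; omega
    -- d2' = d2 + 1
    · rcases i2 with h' | ⟨i, hi, h'⟩
      · left; simp [oC_app1]; omega
      · right; refine ⟨i, by simp; omega, ?_⟩
        rw [g2_app p '1' hi]; simp; omega
    -- d3' = min d3 d0
    · rcases i3 with h' | ⟨i, hi, h'⟩
      · rcases le_or_gt d3 d0 with hm | hm
        · left; rw [min_eq_left hm]; simp [zC_app1]; omega
        · right; refine ⟨p.length, by simp, ?_⟩
          rw [g3_app_len]; simp; omega
      · rcases le_or_gt d3 d0 with hm | hm
        · right; refine ⟨i, by simp; omega, ?_⟩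
          rw [min_eq_left hm, g3_app p '1' hi]; simp; omega
        · right; refine ⟨p.length, by simp, ?_⟩
          rw [min_eq_right (le_of_lt hm), g3_app_len]; simp; omega
    -- d4' = d4 + 1
    · rcases i4 with h' | ⟨i, j, hij, hj, h'⟩
      · left; simp [oC_app1]; omega
      · right; refine ⟨i, j, hij, by simp; omega, ?_⟩
        rw [pc2_app p '1' (le_trans hij hj) hj]; simp; omega
    -- d5' = min d5 d2
    · rcases le_or_gt d5 d2 with hm | hm
      · rw [min_eq_left hm]
        rcases i5 with h' | ⟨i, j, hij, hj, h'⟩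
        · left; simp [zC_app1]; omega
        · right; refine ⟨i, j, hij, by simp; omega, ?_⟩
          rw [pc1_app p '1' (le_trans hij hj) hj]; simp; omega
      · rw [min_eq_right (le_of_lt hm)]
        rcases i2 with h' | ⟨i, hi, h'⟩
        · right; refine ⟨p.length + 1, p.length + 1, le_rfl, by simp, ?_⟩
          rw [pc1_app_tt]; simp [zC_app1]; omega
        · right; refine ⟨i, p.length, hi, by simp, ?_⟩
          rw [pc1_app_len p '1' hi]; simp; omega
    -- le2 : ∀ i ≤ len+1, min d1 (d2+1) ≤ g2 P i
    · intro i hi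
      simp only [List.length_append, List.length_cons, List.length_nil] at hi
      rcases Nat.lt_or_ge i (p.length + 1) with hlt | hge
      · have hi' : i ≤ p.length := by omega
        have := l2 i hi'
        rw [g2_app p '1' hi']; simp; omega
      · have hieq : i = p.length + 1 := by omega
        subst hieq; rw [g2_app_top]; simp [zC_app1]; omega
    -- le3 : min (d0+1) (min d3 d0) ≤ g3 P i
    · intro i hi
      simp only [List.length_append, List.length_cons, List.length_nil] at hi
      rcases Nat.lt_or_ge i (p.length + 1) with hlt | hge
      · have hi' : i ≤ p.length := by omega
        have := l3 i hi'
        rw [g3_app p '1' hi']; simp; omega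
      · have hieq : i = p.length + 1 := by omega
        subst hieq; rw [g3_app_top]; simp [oC_app1]; omega
    -- le4 : min (d0+1) (min (min d3 d0) (d4+1)) ≤ pc2 P i j
    · intro i j hij hj
      simp only [List.length_append, List.length_cons, List.length_nil] at hj
      rcases Nat.lt_or_ge j (p.length + 1) with hlt | hge
      · have hj' : j ≤ p.length := by omega
        have := l4 i j hij hj'
        rw [pc2_app p '1' (le_trans hij hj') hj']; simp; omega
      · have hjeq : j = p.length + 1 := by omega
        subst hjeq
        rcases Nat.lt_or_ge i (p.length + 1) with hilt | hige
        · have hi' : i ≤ p.length := by omega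
          have := l3 i hi'
          rw [pc2_app_top p '1' hi']; simp; omega
        · have hieq : i = p.length + 1 := by omega
          subst hieq; rw [pc2_app_tt]; simp [oC_app1]; omega
    -- le5 : min d1 (min (d2+1) (min d5 d2)) ≤ pc1 P i j
    · intro i j hij hj
      simp only [List.length_append, List.length_cons, List.length_nil] at hj
      rcases Nat.lt_or_ge j (p.length + 1) with hlt | hge
      · have hj' : j ≤ p.length := by omega
        have := l5 i j hij hj'
        rw [pc1_app p '1' (le_trans hij hj') hj']; simp; omega
      · have hjeq : j = p.length + 1 := by omega
        subst hjeq
        rcases Nat.lt_or_ge i (p.length + 1) with hilt | hige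
        · have hi' : i ≤ p.length := by omega
          have := l2 i hi'
          rw [pc1_app_top p '1' hi']; simp; omega
        · have hieq : i = p.length + 1 := by omega
          subst hieq; rw [pc1_app_tt]; simp [zC_app1]; omega
  · simp only [aStep, if_neg hc]
    refine ⟨?_, ?_, ?_, ?_, ?_, ?_, ?_, ?_, ?_, ?_⟩
    · simp [oC_app1, hc]; omega
    · simp [zC_app1, hc]; omega
    -- d2' = min d2 d1
    · rcases le_or_gt d2 d1 with hm | hm
      · rw [min_eq_left hm]
        rcases i2 with h' | ⟨i, hi, h'⟩
        · left; simp [oC_app1, hc]; omega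
        · right; refine ⟨i, by simp; omega, ?_⟩
          rw [g2_app p c hi]; simp [hc]; omega
      · rw [min_eq_right (le_of_lt hm)]
        right; refine ⟨p.length, by simp, ?_⟩
        rw [g2_app_len]; simp [hc]; omega
    -- d3' = d3 + 1
    · rcases i3 with h' | ⟨i, hi, h'⟩
      · left; simp [zC_app1, hc]; omega
      · right; refine ⟨i, by simp; omega, ?_⟩
        rw [g3_app p c hi]; simp [hc]; omega
    -- d4' = min d4 d3
    · rcases le_or_gt d4 d3 with hm | hm
      · rw [min_eq_left hm]
        rcases i4 with h' | ⟨i, j, hij, hj, h'⟩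
        · left; simp [oC_app1, hc]; omega
        · right; refine ⟨i, j, hij, by simp; omega, ?_⟩
          rw [pc2_app p c (le_trans hij hj) hj]; simp [hc]; omega
      · rw [min_eq_right (le_of_lt hm)]
        rcases i3 with h' | ⟨i, hi, h'⟩
        · right; refine ⟨p.length + 1, p.length + 1, le_rfl, by simp, ?_⟩
          rw [pc2_app_tt]; simp [oC_app1, hc]
          have := oC_le_len p; omega
        · right; refine ⟨i, p.length, hi, by simp, ?_⟩
          rw [pc2_app_len p c hi]; simp [hc]; omega
    -- d5' = d5 + 1
    · rcases i5 with h' | ⟨i, j, hij, hj, h'⟩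
      · left; simp [zC_app1, hc]; omega
      · right; refine ⟨i, j, hij, by simp; omega, ?_⟩
        rw [pc1_app p c (le_trans hij hj) hj]; simp [hc]; omega
    -- le2 : min (d1+1) (min d2 d1) ≤ g2 P i
    · intro i hi
      simp only [List.length_append, List.length_cons, List.length_nil] at hi
      rcases Nat.lt_or_ge i (p.length + 1) with hlt | hge
      · have hi' : i ≤ p.length := by omega
        have := l2 i hi'
        rw [g2_app p c hi']; simp [hc]; omega
      · have hieq : i = p.length + 1 := by omega
        subst hieq; rw [g2_app_top]; simp [zC_app1, hc]; omega
    -- le3 : min d0 (d3+1) ≤ g3 P i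
    · intro i hi
      simp only [List.length_append, List.length_cons, List.length_nil] at hi
      rcases Nat.lt_or_ge i (p.length + 1) with hlt | hge
      · have hi' : i ≤ p.length := by omega
        have := l3 i hi'
        rw [g3_app p c hi']; simp [hc]; omega
      · have hieq : i = p.length + 1 := by omega
        subst hieq; rw [g3_app_top]; simp [oC_app1, hc]; omega
    -- le4 : min d0 (min (d3+1) (min d4 d3)) ≤ pc2 P i j
    · intro i j hij hj
      simp only [List.length_append, List.length_cons, List.length_nil] at hj
      rcases Nat.lt_or_ge j (p.length + 1) with hlt | hge
      · have hj' : j ≤ p.length := by omega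
        have := l4 i j hij hj'
        rw [pc2_app p c (le_trans hij hj') hj']; simp [hc]; omega
      · have hjeq : j = p.length + 1 := by omega
        subst hjeq
        rcases Nat.lt_or_ge i (p.length + 1) with hilt | hige
        · have hi' : i ≤ p.length := by omega
          have := l3 i hi'
          rw [pc2_app_top p c hi']; simp [hc]; omega
        · have hieq : i = p.length + 1 := by omega
          subst hieq; rw [pc2_app_tt]; simp [oC_app1, hc]; omega
    -- le5 : min (d1+1) (min (min d2 d1) (d5+1)) ≤ pc1 P i j
    · intro i j hij hj
      simp only [List.length_append, List.length_cons, List.length_nil] at hj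
      rcases Nat.lt_or_ge j (p.length + 1) with hlt | hge
      · have hj' : j ≤ p.length := by omega
        have := l5 i j hij hj'
        rw [pc1_app p c (le_trans hij hj') hj']; simp [hc]; omega
      · have hjeq : j = p.length + 1 := by omega
        subst hjeq
        rcases Nat.lt_or_ge i (p.length + 1) with hilt | hige
        · have hi' : i ≤ p.length := by omega
          have := l2 i hi'
          rw [pc1_app_top p c hi']; simp [hc]; omega
        · have hieq : i = p.length + 1 := by omega
          subst hieq; rw [pc1_app_tt]; simp [zC_app1, hc]; omega

lemma inv_fold (n : Int) : ∀ (l p : List Char) (d0 d1 d2 d3 d4 d5 : Int),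
    AInv n p d0 d1 d2 d3 d4 d5 → ((p.length : Int) + l.length ≤ n) →
    AInv n (p ++ l) (l.foldl aStep (d0, d1, d2, d3, d4, d5)).1
      (l.foldl aStep (d0, d1, d2, d3, d4, d5)).2.1
      (l.foldl aStep (d0, d1, d2, d3, d4, d5)).2.2.1
      (l.foldl aStep (d0, d1, d2, d3, d4, d5)).2.2.2.1
      (l.foldl aStep (d0, d1, d2, d3, d4, d5)).2.2.2.2.1
      (l.foldl aStep (d0, d1, d2, d3, d4, d5)).2.2.2.2.2 := by
  intro l
  induction l with
  | nil => intro p d0 d1 d2 d3 d4 d5 h _; simpa using h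
  | cons c t ih =>
    intro p d0 d1 d2 d3 d4 d5 h hlen
    rcases hA : aStep (d0, d1, d2, d3, d4, d5) c with ⟨e0, e1, e2, e3, e4, e5⟩
    have hstep := inv_step n p c d0 d1 d2 d3 d4 d5 h (by simp at hlen; omega)
    rw [hA] at hstep
    have := ih (p ++ [c]) e0 e1 e2 e3 e4 e5 hstep (by simp at hlen ⊢; omega)
    simpa [hA, List.append_assoc] using this

-- ---- B-side characterisation ----

-- generic bounds for min-folds
lemma pvFoldLeInit {α : Type} (f : Int → α → Int) (h : ∀ b x, f b x ≤ b) :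
    ∀ (l : List α) (a : Int), l.foldl f a ≤ a := by
  intro l
  induction l with
  | nil => intro a; simp
  | cons x t ih => intro a; exact le_trans (ih (f a x)) (h a x)

lemma pvFoldLeElem {α : Type} (f : Int → α → Int) (h : ∀ b x, f b x ≤ b)
    (g : α → Int) (x : α) (hx : ∀ b, f b x ≤ g x) :
    ∀ (l : List α) (a : Int), x ∈ l → l.foldl f a ≤ g x := by
  intro l
  induction l with
  | nil => intro a hm; simp at hm
  | cons y t ih =>
    intro a hm
    rcases List.mem_cons.mp hm with rfl | hm
    · exact le_trans (pvFoldLeInit f h t (f a x)) (hx a)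
    · exact ih (f a y) hm

lemma pvFoldMem {α : Type} (f : Int → α → Int) (Q : α → Int → Prop) :
    ∀ (l : List α) (a : Int), (∀ b x, x ∈ l → f b x = b ∨ Q x (f b x)) →
      l.foldl f a = a ∨ ∃ x ∈ l, Q x (l.foldl f a) := by
  intro l
  induction l with
  | nil => intro a _; simp
  | cons x t ih =>
    intro a h
    rcases ih (f a x) (fun b y hy => h b y (List.mem_cons_of_mem _ hy)) with h1 | ⟨y, hy, hQ⟩
    · rcases h a x List.mem_cons_self with h2 | h2
      · left; rw [List.foldl_cons, h2]; rw [h2] at h1; exact h1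
      · right; exact ⟨x, List.mem_cons_self, by rw [List.foldl_cons, h1]; exact h2⟩
    · right; exact ⟨y, List.mem_cons_of_mem _ hy, hQ⟩

-- prefix-sum list: (buildOnes l).1.getD k 0 = oC (l.take k) for k ≤ |l|
def psums (cnt : Int) : List Char → List Int
  | [] => []
  | c :: t => (if c = '1' then cnt + 1 else cnt) :: psums (if c = '1' then cnt + 1 else cnt) t

lemma buildOnes_go : ∀ (l : List Char) (acc : List Int) (cnt : Int),
    l.foldl (fun (st : List Int × Int) c =>
      let cnt := if c = '1' then st.2 + 1 else st.2
      (st.1 ++ [cnt], cnt)) (acc, cnt) = (acc ++ psums cnt l, cnt + oC l) := by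
  intro l
  induction l with
  | nil => intro acc cnt; simp [psums, oC]
  | cons c t ih =>
    intro acc cnt
    by_cases hc : c = '1' <;> simp [psums, oC, hc, ih] <;> ring_nf

lemma psums_getD : ∀ (l : List Char) (cnt : Int) (k : Nat), k ≤ l.length →
    ((cnt :: psums cnt l).getD k 0) = cnt + oC (l.take k) := by
  intro l
  induction l with
  | nil =>
    intro cnt k hk
    have : k = 0 := by simpa using hk
    subst this; simp [oC]
  | cons c t ih =>
    intro cnt k hk
    cases k with
    | zero => simp [oC]
    | succ k =>
      have hk' : k ≤ t.length := by simpa using hk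
      simp only [psums, List.getD_cons_succ]
      rw [ih _ k hk']
      simp only [List.take_succ_cons, oC]
      split <;> ring

lemma buildOnes_getD (l : List Char) : ∀ k, k ≤ l.length → ((buildOnes l).1.getD k 0) = oC (l.take k) := by
  intro k hk
  have h := buildOnes_go l [0] 0
  unfold buildOnes
  rw [h]
  simpa using psums_getD l 0 k hk

-- the two costs computed by bInner are exactly pc1/pc2 at the Nat indices
lemma cost_eq (l : List Char) (i j : Int) (h0 : 0 ≤ i) (hij : i ≤ j) (hj : j ≤ (l.length : Int)) :
    ((i - (buildOnes l).1.getD i.toNat 0) + ((buildOnes l).1.getD j.toNat 0 - (buildOnes l).1.getD i.toNat 0)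
        + (((l.length : Int) - (buildOnes l).1.getD l.length 0) - (j - (buildOnes l).1.getD j.toNat 0))
      = pc1 l i.toNat j.toNat)
    ∧ ((buildOnes l).1.getD i.toNat 0 + ((j - (buildOnes l).1.getD j.toNat 0) - (i - (buildOnes l).1.getD i.toNat 0))
        + ((buildOnes l).1.getD l.length 0 - (buildOnes l).1.getD j.toNat 0)
      = pc2 l i.toNat j.toNat) := by
  have hiN : i.toNat ≤ l.length := by omega
  have hjN : j.toNat ≤ l.length := by omega
  rw [buildOnes_getD l i.toNat hiN, buildOnes_getD l j.toNat hjN, buildOnes_getD l l.length le_rfl]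
  have e1 : oC (l.take i.toNat) + zC (l.take i.toNat) = ((l.take i.toNat).length : Int) := oC_add_zC _
  have e2 : oC (l.take j.toNat) + zC (l.take j.toNat) = ((l.take j.toNat).length : Int) := oC_add_zC _
  have e3 := oC_add_zC l
  rw [List.length_take] at e1 e2
  constructor <;> simp only [pc1, pc2, List.take_length] <;> omega

lemma bInner_le (ones : List Int) (n : Nat) (i : Int) : ∀ b j, bInner ones n i b j ≤ b := by
  intro b j
  simp only [bInner]
  exact le_trans (min_le_left _ _) (min_le_left _ _)

lemma bOuter_le (ones : List Int) (n : Nat) : ∀ b i, bOuter ones n b i ≤ b := by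
  intro b i
  exact pvFoldLeInit _ (bInner_le ones n i) _ b

lemma alt_le_init (S : String) : min_deletions_to_make_pure_alt S ≤ (S.toList.length : Int) := by
  unfold min_deletions_to_make_pure_alt
  exact pvFoldLeInit _ (bOuter_le _ _) _ _

lemma alt_le_pc (S : String) : ∀ (i j : Nat), i ≤ j → j ≤ S.toList.length →
    min_deletions_to_make_pure_alt S ≤ pc1 S.toList i j ∧
    min_deletions_to_make_pure_alt S ≤ pc2 S.toList i j := by
  intro i j hij hj
  have hmo : (i : Int) ∈ PySem.List.pyRange 0 ((S.toList.length : Int) + 1) 1 := by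
    rw [PySem.List.mem_pyRange_one]; omega
  have hmi : (j : Int) ∈ PySem.List.pyRange (i : Int) ((S.toList.length : Int) + 1) 1 := by
    rw [PySem.List.mem_pyRange_one]; omega
  have hc := cost_eq S.toList (i : Int) (j : Int) (by omega) (by omega) (by omega)
  simp only [Int.toNat_natCast] at hc
  constructor
  · unfold min_deletions_to_make_pure_alt
    refine pvFoldLeElem _ (bOuter_le _ _) (fun _ => pc1 S.toList i j) (i : Int) ?_ _ _ hmo
    intro b
    unfold bOuter
    refine pvFoldLeElem _ (bInner_le _ _ _) (fun _ => pc1 S.toList i j) (j : Int) ?_ _ _ hmi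
    intro b'
    simp only [bInner]
    rw [← hc.1]
    exact le_trans (min_le_left _ _) (min_le_right _ _)
  · unfold min_deletions_to_make_pure_alt
    refine pvFoldLeElem _ (bOuter_le _ _) (fun _ => pc2 S.toList i j) (i : Int) ?_ _ _ hmo
    intro b
    unfold bOuter
    refine pvFoldLeElem _ (bInner_le _ _ _) (fun _ => pc2 S.toList i j) (j : Int) ?_ _ _ hmi
    intro b'
    simp only [bInner]
    rw [← hc.2]
    exact min_le_right _ _

lemma min3_choice (b x y : Int) :
    min (min b x) y = b ∨ min (min b x) y = x ∨ min (min b x) y = y := by omega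

lemma bInner_cases (ones : List Int) (n : Nat) (i b j : Int) :
    bInner ones n i b j = b ∨
    bInner ones n i b j = (i - ones.getD i.toNat 0) + (ones.getD j.toNat 0 - ones.getD i.toNat 0)
        + (((n : Int) - ones.getD n 0) - (j - ones.getD j.toNat 0)) ∨
    bInner ones n i b j = ones.getD i.toNat 0 + ((j - ones.getD j.toNat 0) - (i - ones.getD i.toNat 0))
        + (ones.getD n 0 - ones.getD j.toNat 0) := by
  simp only [bInner]
  exact min3_choice _ _ _

lemma alt_mem (S : String) : min_deletions_to_make_pure_alt S = (S.toList.length : Int) ∨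
    ∃ i j : Nat, i ≤ j ∧ j ≤ S.toList.length ∧
      (min_deletions_to_make_pure_alt S = pc1 S.toList i j ∨
       min_deletions_to_make_pure_alt S = pc2 S.toList i j) := by
  have hbody : ∀ (b i : Int), i ∈ PySem.List.pyRange 0 ((S.toList.length : Int) + 1) 1 →
      bOuter (buildOnes S.toList).1 S.toList.length b i = b ∨
      (∃ a c : Nat, a ≤ c ∧ c ≤ S.toList.length ∧
        (bOuter (buildOnes S.toList).1 S.toList.length b i = pc1 S.toList a c ∨
         bOuter (buildOnes S.toList).1 S.toList.length b i = pc2 S.toList a c)) := by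
    intro b i hi
    rw [PySem.List.mem_pyRange_one] at hi
    unfold bOuter
    have hin : ∀ (b' j : Int), j ∈ PySem.List.pyRange i ((S.toList.length : Int) + 1) 1 →
        bInner (buildOnes S.toList).1 S.toList.length i b' j = b' ∨
        (bInner (buildOnes S.toList).1 S.toList.length i b' j = pc1 S.toList i.toNat j.toNat ∨
         bInner (buildOnes S.toList).1 S.toList.length i b' j = pc2 S.toList i.toNat j.toNat) := by
      intro b' j hj
      rw [PySem.List.mem_pyRange_one] at hj
      have hc := cost_eq S.toList i j (by omega) (by omega) (by omega)
      rcases bInner_cases (buildOnes S.toList).1 S.toList.length i b' j with h | h | h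
      · exact Or.inl h
      · right; left; rw [h]; exact hc.1
      · right; right; rw [h]; exact hc.2
    rcases pvFoldMem (bInner (buildOnes S.toList).1 S.toList.length i)
        (fun j v => v = pc1 S.toList i.toNat j.toNat ∨ v = pc2 S.toList i.toNat j.toNat) _ b hin with
      h | ⟨j, hj, hQ⟩
    · exact Or.inl h
    · right
      rw [PySem.List.mem_pyRange_one] at hj
      exact ⟨i.toNat, j.toNat, by omega, by omega, hQ⟩
  have H := pvFoldMem (bOuter (buildOnes S.toList).1 S.toList.length)
    (fun i v => ∃ a c : Nat, a ≤ c ∧ c ≤ S.toList.length ∧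
      (v = pc1 S.toList a c ∨ v = pc2 S.toList a c))
    (PySem.List.pyRange 0 ((S.toList.length : Int) + 1) 1) ((S.toList.length : Int)) hbody
  have halt : min_deletions_to_make_pure_alt S =
      (PySem.List.pyRange 0 ((S.toList.length : Int) + 1) 1).foldl
        (bOuter (buildOnes S.toList).1 S.toList.length) ((S.toList.length : Int)) := rfl
  rw [halt]
  rcases H with h | ⟨x, hx, a, c, hac, hcN, hQ⟩
  · exact Or.inl h
  · exact Or.inr ⟨a, c, hac, hcN, hQ⟩

-- ===== VERDICT (by name: the statement is the Claim_ definition above) =====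
theorem min_deletions_to_make_pure_spec : Claim_equal_min_deletions_to_make_pure := by
  intro S _
  unfold Spec_min_deletions_to_make_pure
  have hInv := inv_fold ((S.toList.length : Int)) S.toList [] 0 0
    ((S.toList.length : Int)) ((S.toList.length : Int)) ((S.toList.length : Int)) ((S.toList.length : Int))
    (inv_init _) (by simp)
  rcases hF : S.toList.foldl aStep (0, 0, (S.toList.length : Int), (S.toList.length : Int),
      (S.toList.length : Int), (S.toList.length : Int)) with ⟨d0, d1, d2, d3, d4, d5⟩
  rw [hF] at hInv
  simp only [List.nil_append] at hInv
  obtain ⟨e0, e1, i2, i3, i4, i5, lI2, lI3, lI4, lI5⟩ := hInv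
  have hA : min_deletions_to_make_pure S = min (min (min (min (min d0 d1) d2) d3) d4) d5 := by
    unfold min_deletions_to_make_pure
    rw [hF]
  have hBinit := alt_le_init S
  have hBpc := alt_le_pc S
  have hBmem := alt_mem S
  have hoN := oC_le_len S.toList
  have hzN := zC_le_len S.toList
  have honn := oC_nonneg S.toList
  have hznn := zC_nonneg S.toList
  have hpc1NN : pc1 S.toList S.toList.length S.toList.length = zC S.toList := by
    simp only [pc1, List.take_length]; ring
  have hpc2NN : pc2 S.toList S.toList.length S.toList.length = oC S.toList := by
    simp only [pc2, List.take_length]; ring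
  have hg2top : ∀ i : Nat, pc1 S.toList i S.toList.length = g2 S.toList i := by
    intro i; simp only [pc1, g2, List.take_length]; ring
  have hg3top : ∀ i : Nat, pc2 S.toList i S.toList.length = g3 S.toList i := by
    intro i; simp only [pc2, g3, List.take_length]; ring
  rw [hA]
  -- A ≤ B
  have hALeB : min (min (min (min (min d0 d1) d2) d3) d4) d5 ≤ min_deletions_to_make_pure_alt S := by
    rcases hBmem with hB | ⟨i, j, hij, hj, hB | hB⟩
    · omega
    · have := lI5 i j hij hj; omega
    · have := lI4 i j hij hj; omega
  -- B ≤ A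
  have hb0 : min_deletions_to_make_pure_alt S ≤ d0 := by
    have := (hBpc S.toList.length S.toList.length le_rfl le_rfl).2; omega
  have hb1 : min_deletions_to_make_pure_alt S ≤ d1 := by
    have := (hBpc S.toList.length S.toList.length le_rfl le_rfl).1; omega
  have hb2 : min_deletions_to_make_pure_alt S ≤ d2 := by
    rcases i2 with h | ⟨i, hi, h⟩
    · omega
    · have := (hBpc i S.toList.length hi le_rfl).1
      rw [hg2top i] at this; omega
  have hb3 : min_deletions_to_make_pure_alt S ≤ d3 := by
    rcases i3 with h | ⟨i, hi, h⟩
    · omega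
    · have := (hBpc i S.toList.length hi le_rfl).2
      rw [hg3top i] at this; omega
  have hb4 : min_deletions_to_make_pure_alt S ≤ d4 := by
    rcases i4 with h | ⟨i, j, hij, hj, h⟩
    · omega
    · have := (hBpc i j hij hj).2; omega
  have hb5 : min_deletions_to_make_pure_alt S ≤ d5 := by
    rcases i5 with h | ⟨i, j, hij, hj, h⟩
    · omega
    · have := (hBpc i j hij hj).1; omega
  omega
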